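-- pv_equiv track=rewrite | github.com/SherazM1/Soapbox-Reporting | audit_generate.py | generate_top_priority_fixes
-- ===== SOURCE A (Python) =====
-- from typing import Any
--
-- SEVERITY_WEIGHT = {"high": 3, "medium": 2, "low": 1}
--
-- def _findings_by_section(findings: list[dict[str, Any]], section: str) -> list[dict[str, Any]]:
--     return [f for f in findings if f.get("section") == section]
--
-- def generate_top_priority_fixes(findings: list[dict[str, Any]]) -> list[str]:
--     title_issue_types = {str(f.get("issue_type", "")) for f in _findings_by_section(findings, "title")}
--     title_specific_fix = "Tighten the title to a clear, structured format with key differentiators"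
--     if "title_too_long" in title_issue_types:
--         title_specific_fix = "Shorten the title to 90 characters or less while keeping key product identifiers"
--     elif {"promo_language", "offer_shipping_availability_language"} & title_issue_types:
--         title_specific_fix = "Remove promotional, shipping, and offer language from the title"
--     elif "disallowed_or_construction" in title_issue_types:
--         title_specific_fix = 'Replace ambiguous "or" title construction with one clear product naming path'
--     elif "suspicious_special_characters" in title_issue_types:
--         title_specific_fix = "Remove non-compliant special characters from the title"
--     elif "keyword_stuffing" in title_issue_types:
--         title_specific_fix = "Reduce repetitive keywords in the title and keep phrasing concise"
--
--     theme_map = {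
--         "title": title_specific_fix,
--         "description": "Strengthen description depth with clearer use-case and benefit language",
--         "key_features": "Rebuild key features into clean, non-overlapping shopper-focused bullets",
--         "images": "Upgrade the visual stack with stronger hero and support imagery",
--     }
--     ranked = sorted(
--         findings,
--         key=lambda f: (-SEVERITY_WEIGHT.get(str(f.get("severity", "low")), 1), str(f.get("section", ""))),
--     )
--     fixes: list[str] = []
--     seen_sections: set[str] = set()
--     for f in ranked:
--         sec = str(f.get("section", ""))
--         if sec in seen_sections:
--             continue
--         if sec in theme_map:
--             fixes.append(theme_map[sec])
--             seen_sections.add(sec)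
--         if len(fixes) >= 5:
--             break
--
--     if not fixes:
--         fixes = ["Maintain current content strengths and address minor consistency issues"]
--
--     fallback_themes = [
--         theme_map["title"],
--         theme_map["description"],
--         theme_map["key_features"],
--         theme_map["images"],
--     ]
--     for item in fallback_themes:
--         if len(fixes) >= 3:
--             break
--         if item not in fixes:
--             fixes.append(item)
--     return fixes[:5]
-- ===== SOURCE B (Python) =====
-- from typing import Any
--
-- SEVERITY_WEIGHT = {"high": 3, "medium": 2, "low": 1}
--
-- def generate_top_priority_fixes(findings: list[dict[str, Any]]) -> list[str]:
--     # One pass: best severity weight per theme section, then emit the <=4 theme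
--     # fixes bucketed by weight (3,2,1) and alphabetical section within a bucket
--     # -- no sort of the findings list, no dedup scan.
--     title_issue_types = {str(f.get("issue_type", "")) for f in findings if f.get("section") == "title"}
--     title_fix = "Tighten the title to a clear, structured format with key differentiators"
--     if "title_too_long" in title_issue_types:
--         title_fix = "Shorten the title to 90 characters or less while keeping key product identifiers"
--     elif "promo_language" in title_issue_types or "offer_shipping_availability_language" in title_issue_types:
--         title_fix = "Remove promotional, shipping, and offer language from the title"
--     elif "disallowed_or_construction" in title_issue_types:
--         title_fix = 'Replace ambiguous "or" title construction with one clear product naming path'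
--     elif "suspicious_special_characters" in title_issue_types:
--         title_fix = "Remove non-compliant special characters from the title"
--     elif "keyword_stuffing" in title_issue_types:
--         title_fix = "Reduce repetitive keywords in the title and keep phrasing concise"
--
--     theme_map = {
--         "title": title_fix,
--         "description": "Strengthen description depth with clearer use-case and benefit language",
--         "key_features": "Rebuild key features into clean, non-overlapping shopper-focused bullets",
--         "images": "Upgrade the visual stack with stronger hero and support imagery",
--     }
--     best = {"title": 0, "description": 0, "key_features": 0, "images": 0}
--     for f in findings:
--         sec = str(f.get("section", ""))
--         if sec in best:
--             w = SEVERITY_WEIGHT.get(str(f.get("severity", "low")), 1)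
--             if best[sec] < w:
--                 best[sec] = w
--     fixes = [
--         theme_map[s]
--         for v in (3, 2, 1)
--         for s in ("description", "images", "key_features", "title")
--         if best[s] == v
--     ]
--     if not fixes:
--         fixes = ["Maintain current content strengths and address minor consistency issues"]
--     for item in (theme_map["title"], theme_map["description"], theme_map["key_features"], theme_map["images"]):
--         if len(fixes) >= 3:
--             break
--         if item not in fixes:
--             fixes.append(item)
--     return fixes
-- ===== Notes on version B (the rewrite author's own statement) =====
-- stated objective: alternative
-- what changed: Instead of sorting all findings by (-severity, section) and scanning the sorted list with a seen-set to dedup sections, B makes one pass recording the best severity weight per theme section and then emits the at most 4 theme fixes bucketed by weight (3,2,1) with alphabetical section order inside a bucket.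
import Mathlib
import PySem

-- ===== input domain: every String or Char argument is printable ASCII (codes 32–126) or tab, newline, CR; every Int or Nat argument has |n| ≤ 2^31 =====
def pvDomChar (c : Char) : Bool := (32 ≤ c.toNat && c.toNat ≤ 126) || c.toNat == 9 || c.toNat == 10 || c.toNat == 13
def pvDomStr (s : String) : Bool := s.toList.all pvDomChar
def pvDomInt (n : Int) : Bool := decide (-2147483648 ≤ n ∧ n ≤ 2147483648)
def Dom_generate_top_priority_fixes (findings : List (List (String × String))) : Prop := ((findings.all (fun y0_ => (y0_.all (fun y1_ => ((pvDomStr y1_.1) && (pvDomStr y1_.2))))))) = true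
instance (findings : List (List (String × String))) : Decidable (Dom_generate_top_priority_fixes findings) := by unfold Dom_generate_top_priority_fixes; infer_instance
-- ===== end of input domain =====

-- B replaces A's sort of all findings + dedup scan by one pass recording the best severity
-- weight per theme section, then emits the ≤4 theme fixes bucketed by weight (objective: alternative).

-- ===== shared helpers (the same Python built-ins appear in both sources) =====

-- f.get(k)  (a finding is a dict str -> str)
def fGet? (f : List (String × String)) (k : String) : Option String := (PySem.Dict.mk f).get? k
-- f.get(k, d)
def fGetD (f : List (String × String)) (k d : String) : String := (PySem.Dict.mk f).getD k d

-- SEVERITY_WEIGHT.get(str(f.get("severity", "low")), 1)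
def sevWeight (f : List (String × String)) : Int :=
  (PySem.Dict.mk [("high", (3 : Int)), ("medium", 2), ("low", 1)]).getD (fGetD f "severity" "low") 1

def fixShorten : String := "Shorten the title to 90 characters or less while keeping key product identifiers"
def fixPromo : String := "Remove promotional, shipping, and offer language from the title"
def fixOr : String := "Replace ambiguous \"or\" title construction with one clear product naming path"
def fixSpecial : String := "Remove non-compliant special characters from the title"
def fixKeyword : String := "Reduce repetitive keywords in the title and keep phrasing concise"
def fixTighten : String := "Tighten the title to a clear, structured format with key differentiators"
def fixDesc : String := "Strengthen description depth with clearer use-case and benefit language"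
def fixKF : String := "Rebuild key features into clean, non-overlapping shopper-focused bullets"
def fixImg : String := "Upgrade the visual stack with stronger hero and support imagery"
def fixMaintain : String := "Maintain current content strengths and address minor consistency issues"

-- theme_map (its "title" entry depends on the chosen title fix)
def themeDict (tf : String) : PySem.Dict String String :=
  PySem.Dict.mk [("title", tf), ("description", fixDesc), ("key_features", fixKF), ("images", fixImg)]

-- the identical fallback loop at the end of both sources:
-- for item in …: if len(fixes) >= 3: break; if item not in fixes: fixes.append(item)
def fallbackFill : List String → List String → List String
  | [], fixes => fixes
  | item :: rest, fixes =>
    if 3 ≤ fixes.length then fixes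
    else if fixes.contains item then fallbackFill rest fixes
    else fallbackFill rest (fixes ++ [item])

-- ===== PORT A =====

-- helper _findings_by_section (f.get("section") == section; None on a missing key ≠ any string)
def findings_by_section (findings : List (List (String × String))) (sec : String) :
    List (List (String × String)) :=
  findings.filter (fun f => fGet? f "section" == some sec)

-- the title_specific_fix if/elif chain; A's second test is set-intersection truthiness
def titleFixA (tt : PySem.Set String) : String :=
  if PySem.Set.contains tt "title_too_long" then fixShorten
  else if (PySem.Set.inter (PySem.Set.ofList ["promo_language", "offer_shipping_availability_language"]) tt).length ≠ 0 then fixPromo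
  else if PySem.Set.contains tt "disallowed_or_construction" then fixOr
  else if PySem.Set.contains tt "suspicious_special_characters" then fixSpecial
  else if PySem.Set.contains tt "keyword_stuffing" then fixKeyword
  else fixTighten

-- the main for-loop of A over the ranked findings (sec-in-seen continue, theme append, len>=5 break);
-- theme_map[sec] is guarded by 'sec in theme_map', so its KeyError is unreachable: ported as getD
def fixesLoopA (tm : PySem.Dict String String) :
    List (List (String × String)) → List String → PySem.Set String → List String
  | [], fixes, _ => fixes
  | f :: rest, fixes, seen =>
    let sec := fGetD f "section" ""
    if PySem.Set.contains seen sec then fixesLoopA tm rest fixes seen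
    else if tm.contains sec then
      let fixes' := fixes ++ [tm.getD sec ""]
      if 5 ≤ fixes'.length then fixes' else fixesLoopA tm rest fixes' (PySem.Set.add seen sec)
    else if 5 ≤ fixes.length then fixes else fixesLoopA tm rest fixes seen

def generate_top_priority_fixes (findings : List (List (String × String))) : List String :=
  let titleTypes : PySem.Set String :=
    PySem.Set.ofList ((findings_by_section findings "title").map (fun f => fGetD f "issue_type" ""))
  let tm := themeDict (titleFixA titleTypes)
  let ranked := PySem.List.sorted2 findings (fun f => -(sevWeight f)) (fun f => fGetD f "section" "")
  let fixes0 := fixesLoopA tm ranked [] PySem.Set.empty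
  let fixes1 := if fixes0 = [] then [fixMaintain] else fixes0
  let fixes2 := fallbackFill
    [tm.getD "title" "", tm.getD "description" "", tm.getD "key_features" "", tm.getD "images" ""] fixes1
  PySem.List.slice fixes2 none (some 5)

-- ===== PORT B =====

-- B's title chain tests the two promo issue types with 'or'
def titleFixB (tt : PySem.Set String) : String :=
  if PySem.Set.contains tt "title_too_long" then fixShorten
  else if PySem.Set.contains tt "promo_language" || PySem.Set.contains tt "offer_shipping_availability_language" then fixPromo
  else if PySem.Set.contains tt "disallowed_or_construction" then fixOr
  else if PySem.Set.contains tt "suspicious_special_characters" then fixSpecial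
  else if PySem.Set.contains tt "keyword_stuffing" then fixKeyword
  else fixTighten

-- B's single pass: best severity weight per theme section (keys fixed up front, all-zero)
def bestWeights (findings : List (List (String × String))) : PySem.Dict String Int :=
  findings.foldl
    (fun best f =>
      let sec := fGetD f "section" ""
      if best.contains sec then
        (if best.getD sec 0 < sevWeight f then best.insert sec (sevWeight f) else best)
      else best)
    (PySem.Dict.mk [("title", (0 : Int)), ("description", 0), ("key_features", 0), ("images", 0)])

def generate_top_priority_fixes_alt (findings : List (List (String × String))) : List String :=
  let titleTypes : PySem.Set String :=
    PySem.Set.ofList (((findings.filter (fun f => fGet? f "section" == some "title")).map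
      (fun f => fGetD f "issue_type" "")))
  let tm := themeDict (titleFixB titleTypes)
  let best := bestWeights findings
  -- [theme_map[s] for v in (3,2,1) for s in (…) if best[s] == v]; best[s] is always present: getD
  let fixes0 := ([3, 2, 1] : List Int).flatMap (fun v =>
    ((["description", "images", "key_features", "title"].filter
      (fun t => best.getD t 0 == v)).map (fun t => tm.getD t "")))
  let fixes1 := if fixes0 = [] then [fixMaintain] else fixes0
  fallbackFill
    [tm.getD "title" "", tm.getD "description" "", tm.getD "key_features" "", tm.getD "images" ""] fixes1

-- ===== PRECONDITION & SPEC =====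
def Spec_generate_top_priority_fixes (findings : List (List (String × String))) (out : List String) : Prop := out = generate_top_priority_fixes_alt findings
instance (findings : List (List (String × String))) (out : List String) : Decidable (Spec_generate_top_priority_fixes findings out) := by unfold Spec_generate_top_priority_fixes; infer_instance

-- ===== CLAIM (what is proved, stated in full; the proofs are below) =====
def Claim_equal_generate_top_priority_fixes : Prop := ∀ (findings : List (List (String × String))), Dom_generate_top_priority_fixes findings → Spec_generate_top_priority_fixes findings (generate_top_priority_fixes findings)

-- ===== LEMMAS AND PROOFS =====

-- proof-side abbreviations
def secOf (f : List (String × String)) : String := fGetD f "section" ""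
def themesList : List String := ["title", "description", "key_features", "images"]
def alphaList : List String := ["description", "images", "key_features", "title"]
def mwStep (m : Int) (f : List (String × String)) : Int := max m (sevWeight f)
-- best severity weight of section t in l (0 when t is absent)
def mw (l : List (List (String × String))) (t : String) : Int :=
  (l.filter (fun f => secOf f == t)).foldl mwStep 0
-- the sort key of A, combined into one lexicographic value
def keyA (f : List (String × String)) : Int ×ₗ String := toLex (-(sevWeight f), secOf f)
-- the section-level key that determines the output order
def skey (l : List (List (String × String))) (t : String) : Int ×ₗ String := toLex (-(mw l t), t)
-- the sections A's main loop appends, in order (seen tracked by membership)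
def sel : List (List (String × String)) → List String → List String
  | [], _ => []
  | f :: rest, seen =>
    if secOf f ∈ seen then sel rest seen
    else if secOf f ∈ themesList then secOf f :: sel rest (seen ++ [secOf f])
    else sel rest seen
-- the sections B emits, in order, for a given weight table
def CL (m : String → Int) : List String :=
  ([3, 2, 1] : List Int).flatMap (fun v => alphaList.filter (fun t => m t == v))

-- sevWeight only takes the values 1, 2, 3
theorem sev_cases (f : List (String × String)) :
    sevWeight f = 1 ∨ sevWeight f = 2 ∨ sevWeight f = 3 := by
  unfold sevWeight PySem.Dict.getD PySem.Dict.get?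
  rcases h : List.find? (fun p => p.1 == fGetD f "severity" "low")
      (PySem.Dict.mk [("high", (3:Int)), ("medium", 2), ("low", 1)]).items with _ | p
  · simp [h]
  · have hm := List.mem_of_find?_eq_some h
    simp only [PySem.Dict.mk, List.mem_cons, List.not_mem_nil, or_false] at hm
    rcases hm with rfl | rfl | rfl <;> simp [h]

theorem sev_lb (f : List (String × String)) : 1 ≤ sevWeight f := by
  rcases sev_cases f with h | h | h <;> omega

theorem sev_ub (f : List (String × String)) : sevWeight f ≤ 3 := by
  rcases sev_cases f with h | h | h <;> omega

theorem secOf_def (f : List (String × String)) : fGetD f "section" "" = secOf f := rfl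

-- A's set-intersection truthiness = B's disjunction
theorem titleFix_eq (tt : PySem.Set String) : titleFixA tt = titleFixB tt := by
  unfold titleFixA titleFixB
  by_cases hp : "promo_language" ∈ tt <;>
    by_cases ho : "offer_shipping_availability_language" ∈ tt <;>
      simp [PySem.Set.inter, hp, ho]

-- membership in theme_map is membership in themesList
theorem tm_contains (tf t : String) :
    (themeDict tf).contains t = decide (t ∈ themesList) := by
  apply Bool.eq_iff_iff.mpr
  simp only [themeDict, PySem.Dict.contains, PySem.Dict.mk, List.any_eq_true, List.mem_cons,
    List.not_mem_nil, or_false, beq_iff_eq, themesList, decide_eq_true_eq]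
  constructor
  · rintro ⟨x, (rfl | rfl | rfl | rfl), rfl⟩ <;> tauto
  · rintro (rfl | rfl | rfl | rfl)
    · exact ⟨("title", tf), by tauto, rfl⟩
    · exact ⟨("description", fixDesc), by tauto, rfl⟩
    · exact ⟨("key_features", fixKF), by tauto, rfl⟩
    · exact ⟨("images", fixImg), by tauto, rfl⟩

-- mw basics ---------------------------------------------------------------

theorem foldl_mwStep_init (l : List (List (String × String))) (a : Int) (ha : 0 ≤ a) :
    l.foldl mwStep a = max a (l.foldl mwStep 0) := by
  induction l generalizing a with
  | nil => exact (max_eq_left ha).symm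
  | cons f l ih =>
    have h0 : (0:Int) ≤ mwStep a f := le_trans ha (le_max_left _ _)
    have h1 : (0:Int) ≤ mwStep 0 f := le_max_left _ _
    simp only [List.foldl_cons]
    rw [ih _ h0, ih _ h1]
    simp only [mwStep]
    omega

theorem mw_nonneg (l : List (List (String × String))) (t : String) : 0 ≤ mw l t := by
  have := PySem.List.le_foldl_max_int (l.filter (fun f => secOf f == t)) sevWeight 0
  exact this.1


theorem mw_le_three (l : List (List (String × String))) (t : String) : mw l t ≤ 3 := by
  unfold mw
  induction l with
  | nil => simp
  | cons f l ih =>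
    by_cases h : (secOf f == t) = true <;> simp only [List.filter_cons, h, if_pos, if_neg]
    · simp only [List.foldl_cons]
      rw [foldl_mwStep_init (List.filter (fun f => secOf f == t) l) (mwStep 0 f)
        (by unfold mwStep; exact le_max_left _ _)]
      have := sev_ub f
      simp only [mwStep] at *
      omega
    · exact ih


theorem mw_cons_ne (f : List (String × String)) (l : List (List (String × String))) (t : String)
    (h : secOf f ≠ t) : mw (f :: l) t = mw l t := by
  unfold mw
  simp [List.filter_cons, beq_iff_eq, h]


theorem mw_cons_eq (f : List (String × String)) (l : List (List (String × String))) (t : String)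
    (h : secOf f = t) : mw (f :: l) t = max (sevWeight f) (mw l t) := by
  unfold mw
  simp only [List.filter_cons, h, beq_self_eq_true, if_pos, List.foldl_cons]
  rw [foldl_mwStep_init (List.filter (fun f => secOf f == t) l) (mwStep 0 f)
    (by unfold mwStep; exact le_max_left _ _)]
  have := sev_lb f
  simp only [mwStep]
  omega


theorem mw_perm (l l' : List (List (String × String))) (t : String) (h : l.Perm l') :
    mw l t = mw l' t := by
  induction h with
  | nil => rfl
  | cons x h ih =>
    by_cases hx : secOf x = t
    · rw [mw_cons_eq _ _ _ hx, mw_cons_eq _ _ _ hx, ih]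
    · rw [mw_cons_ne _ _ _ hx, mw_cons_ne _ _ _ hx, ih]
  | swap x y l =>
    by_cases hx : secOf x = t <;> by_cases hy : secOf y = t <;>
      simp [mw_cons_eq, mw_cons_ne, hx, hy, max_left_comm]
  | trans h1 h2 ih1 ih2 => rw [ih1, ih2]


theorem mw_pos_iff (l : List (List (String × String))) (t : String) :
    1 ≤ mw l t ↔ ∃ f ∈ l, secOf f = t := by
  constructor
  · intro h
    by_contra hne
    simp only [not_exists, not_and] at hne
    have hfil : l.filter (fun f => secOf f == t) = [] := by
      rw [List.filter_eq_nil_iff]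
      intro f hf
      simp [beq_iff_eq]
      exact hne f hf
    unfold mw at h
    rw [hfil] at h
    simp at h
  · rintro ⟨f, hf, hsec⟩
    have hmem : f ∈ l.filter (fun f => secOf f == t) := by
      simp [List.mem_filter, hf, hsec]
    have := (PySem.List.le_foldl_max_int (l.filter (fun f => secOf f == t)) sevWeight 0).2 f hmem
    have := sev_lb f
    unfold mw mwStep
    omega


theorem mw_attained (l : List (List (String × String))) (t : String)
    (h : ∃ f ∈ l, secOf f = t) : ∃ g ∈ l, secOf g = t ∧ mw l t = sevWeight g := by
  have hpos : 1 ≤ mw l t := (mw_pos_iff l t).2 h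
  have hrw : mw l t = ((l.filter (fun f => secOf f == t)).map sevWeight).foldl max 0 := by
    unfold mw mwStep
    rw [List.foldl_map]
  rcases PySem.List.foldl_max_mem (((l.filter (fun f => secOf f == t)).map sevWeight)) 0 with h0 | hm
  · rw [hrw] at hpos; rw [h0] at hpos; omega
  · rw [← hrw] at hm
    rcases List.mem_map.mp hm with ⟨g, hg, hgw⟩
    rcases List.mem_filter.mp hg with ⟨hgl, hgt⟩
    exact ⟨g, hgl, by simpa [beq_iff_eq] using hgt, hgw.symm⟩


-- A's sorted2 with the two keys is sorted with the lexicographic key ------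

theorem sorted2_eq_sorted_keyA (xs : List (List (String × String))) :
    PySem.List.sorted2 xs (fun f => -(sevWeight f)) (fun f => fGetD f "section" "") =
    PySem.List.sorted xs keyA := by
  simp only [PySem.List.sorted2, PySem.List.sorted, Bool.false_eq_true, reduceIte]
  congr 1
  funext acc x
  congr 1
  funext a b
  by_cases h1 : -(sevWeight a) < -(sevWeight b)
  · simp [keyA, Prod.Lex.toLex_lt_toLex, h1]
  · by_cases h2 : -(sevWeight b) < -(sevWeight a)
    · simp only [decide_eq_false h1, Bool.false_or, decide_eq_true h2, Bool.not_true,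
        Bool.false_and]
      symm
      rw [decide_eq_false]
      simp only [keyA, Prod.Lex.toLex_lt_toLex]
      rintro (h | ⟨he, -⟩)
      · exact h1 h
      · omega
    · have he : -(sevWeight a) = -(sevWeight b) := le_antisymm (not_lt.mp h2) (not_lt.mp h1)
      simp [keyA, Prod.Lex.toLex_lt_toLex, h1, h2, he, secOf]

-- A's main loop is sel, mapped through the theme map ----------------------

theorem loopA_eq (tf : String) :
    ∀ (l : List (List (String × String))) (fixes : List String) (seen : PySem.Set String),
    seen.Nodup → seen ⊆ themesList → fixes.length = seen.length →
    fixesLoopA (themeDict tf) l fixes seen =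
      fixes ++ (sel l seen).map (fun t => (themeDict tf).getD t "") := by
  intro l
  induction l with
  | nil => intro fixes seen h1 h2 h3; simp [fixesLoopA, sel]
  | cons f rest ih =>
    intro fixes seen h1 h2 h3
    have hlen4 : seen.length ≤ 4 := by
      have := (List.subperm_of_subset h1 h2).length_le
      simpa [themesList] using this
    simp only [fixesLoopA, sel, secOf_def]
    by_cases hm : secOf f ∈ seen
    · have hc : PySem.Set.contains seen (secOf f) = true := (PySem.Set.contains_iff _ _).2 hm
      simp [hc, hm, ih fixes seen h1 h2 h3]
    · have hc : PySem.Set.contains seen (secOf f) = false :=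
        Bool.eq_false_iff.mpr (fun hcc => hm ((PySem.Set.contains_iff _ _).1 hcc))
      by_cases h2' : secOf f ∈ themesList
      · have htc : (themeDict tf).contains (secOf f) = true := by
          rw [tm_contains]; exact decide_eq_true h2'
        have hnd' : (seen ++ [secOf f]).Nodup := by
          rw [List.nodup_append]
          refine ⟨h1, List.nodup_singleton _, ?_⟩
          intro a ha b hb
          rw [List.mem_singleton] at hb
          subst hb
          exact fun he => hm (he ▸ ha)
        have hsub' : (seen ++ [secOf f]) ⊆ themesList := by
          intro t ht
          rcases List.mem_append.mp ht with h | h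
          · exact h2 h
          · rcases List.mem_singleton.mp h with rfl
            exact h2'
        have hlen' : (seen ++ [secOf f]).length ≤ 4 := by
          have := (List.subperm_of_subset hnd' hsub').length_le
          simpa [themesList] using this
        have hbr : ¬ (5 ≤ (fixes ++ [(themeDict tf).getD (secOf f) ""]).length) := by
          simp only [List.length_append, List.length_cons, List.length_nil] at *
          omega
        have hadd : PySem.Set.add seen (secOf f) = seen ++ [secOf f] := by
          simp [PySem.Set.add, hc, hm]
        have hb4 : ¬ 4 ≤ fixes.length := by
          simp only [List.length_append, List.length_cons, List.length_nil] at hlen'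
          omega
        simp [hc, htc, hm, h2', hbr, hb4, hadd,
          ih (fixes ++ [(themeDict tf).getD (secOf f) ""]) (seen ++ [secOf f]) hnd' hsub'
            (by simp [h3]), List.append_assoc]
      · have htc : (themeDict tf).contains (secOf f) = false := by
          rw [tm_contains]; exact decide_eq_false h2'
        have hbr : ¬ (5 ≤ fixes.length) := by omega
        simp [hc, htc, hm, h2', hbr, ih fixes seen h1 h2 h3]

-- sel: membership and nodup -----------------------------------------------

theorem mem_sel : ∀ (l : List (List (String × String))) (seen : List String) (t : String),
    t ∈ sel l seen ↔ t ∈ themesList ∧ t ∉ seen ∧ t ∈ l.map secOf := by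
  intro l
  induction l with
  | nil => intro seen t; simp [sel]
  | cons f rest ih =>
    intro seen t
    simp only [sel]
    by_cases h1 : secOf f ∈ seen
    · rw [if_pos h1, ih]
      simp only [List.map_cons, List.mem_cons]
      constructor
      · rintro ⟨ht, hs, hmem⟩
        exact ⟨ht, hs, Or.inr hmem⟩
      · rintro ⟨ht, hs, (rfl | hmem)⟩
        · exact absurd h1 hs
        · exact ⟨ht, hs, hmem⟩
    · rw [if_neg h1]
      by_cases h2 : secOf f ∈ themesList
      · rw [if_pos h2]
        simp only [List.mem_cons, ih, List.map_cons]
        constructor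
        · rintro (rfl | ⟨ht, hs, hmem⟩)
          · exact ⟨h2, h1, Or.inl rfl⟩
          · have hs1 : t ∉ seen := fun hh => hs (List.mem_append.mpr (Or.inl hh))
            exact ⟨ht, hs1, Or.inr hmem⟩
        · rintro ⟨ht, hs, (rfl | hmem)⟩
          · exact Or.inl rfl
          · by_cases he : t = secOf f
            · exact Or.inl he
            · refine Or.inr ⟨ht, ?_, hmem⟩
              intro hh
              rcases List.mem_append.mp hh with hh | hh
              · exact hs hh
              · exact he (List.mem_singleton.mp hh)
      · rw [if_neg h2, ih]
        simp only [List.map_cons, List.mem_cons]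
        constructor
        · rintro ⟨ht, hs, hmem⟩
          exact ⟨ht, hs, Or.inr hmem⟩
        · rintro ⟨ht, hs, (rfl | hmem)⟩
          · exact absurd ht h2
          · exact ⟨ht, hs, hmem⟩


theorem nodup_sel : ∀ (l : List (List (String × String))) (seen : List String),
    (sel l seen).Nodup := by
  intro l
  induction l with
  | nil => intro seen; simp [sel]
  | cons f rest ih =>
    intro seen
    simp only [sel]
    by_cases h1 : secOf f ∈ seen
    · rw [if_pos h1]; exact ih seen
    · rw [if_neg h1]
      by_cases h2 : secOf f ∈ themesList
      · rw [if_pos h2]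
        refine List.Nodup.cons ?_ (ih _)
        intro hmem
        have := ((mem_sel rest (seen ++ [secOf f]) (secOf f)).1 hmem).2.1
        exact this (List.mem_append.mpr (Or.inr (List.mem_singleton.mpr rfl)))
      · rw [if_neg h2]; exact ih seen


theorem length_sel (l : List (List (String × String))) (seen : List String) :
    (sel l seen).length ≤ 4 := by
  have hs : sel l seen ⊆ themesList := fun t ht => ((mem_sel l seen t).1 ht).1
  have := (List.subperm_of_subset (nodup_sel l seen) hs).length_le
  simpa [themesList] using this


theorem themes_alpha (t : String) : t ∈ themesList ↔ t ∈ alphaList := by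
  simp only [themesList, alphaList, List.mem_cons, List.not_mem_nil, or_false]
  tauto

theorem alpha_lt : alphaList.Pairwise (fun a b : String => a < b) := by
  have h : ∀ a b : String, a.toList < b.toList → a < b := fun a b => String.lt_iff_toList_lt.mpr
  unfold alphaList
  refine List.Pairwise.cons ?_ (List.Pairwise.cons ?_ (List.Pairwise.cons ?_
    (List.pairwise_singleton _ _))) <;>
    · intro b hb
      simp only [List.mem_cons, List.not_mem_nil, or_false] at hb
      rcases hb with rfl | rfl | rfl
      all_goals exact h _ _ (by decide)

-- sel on a key-sorted list is strictly increasing in the section key ------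

theorem sel_pairwise : ∀ (r : List (List (String × String))) (seen : List String),
    r.Pairwise (fun a b => keyA a ≤ keyA b) →
    (sel r seen).Pairwise (fun t u => skey r t < skey r u) := by
  intro r
  induction r with
  | nil => intro seen _; simp [sel]
  | cons f rest ih =>
    intro seen hp
    rcases List.pairwise_cons.mp hp with ⟨hf, hrest⟩
    simp only [sel]
    by_cases h1 : secOf f ∈ seen
    · rw [if_pos h1]
      refine List.Pairwise.imp_of_mem ?_ (ih seen hrest)
      intro a b ha hb hab
      have hA := ((mem_sel rest seen a).1 ha).2.1
      have hB := ((mem_sel rest seen b).1 hb).2.1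
      have haf : secOf f ≠ a := fun he => hA (he ▸ h1)
      have hbf : secOf f ≠ b := fun he => hB (he ▸ h1)
      simp only [skey] at hab ⊢
      rwa [mw_cons_ne f rest a haf, mw_cons_ne f rest b hbf]
    · rw [if_neg h1]
      by_cases h2 : secOf f ∈ themesList
      · rw [if_pos h2]
        refine List.pairwise_cons.mpr ⟨?_, ?_⟩
        · intro u hu
          obtain ⟨hut, hus, hum⟩ := (mem_sel rest (seen ++ [secOf f]) u).1 hu
          have huf : secOf f ≠ u := fun he =>
            hus (he ▸ List.mem_append.mpr (Or.inr (List.mem_singleton.mpr rfl)))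
          obtain ⟨g0, hg0, hg0u⟩ := List.mem_map.mp hum
          obtain ⟨g, hg, hgu, hgw⟩ := mw_attained rest u ⟨g0, hg0, hg0u⟩
          have hmle : mw rest (secOf f) ≤ sevWeight f := by
            by_cases hex : ∃ g' ∈ rest, secOf g' = secOf f
            · obtain ⟨g', hg', hsec', hw'⟩ := mw_attained rest (secOf f) hex
              rw [hw']
              have hk := hf g' hg'
              simp only [keyA, hsec', Prod.Lex.toLex_le_toLex] at hk
              rcases hk with hlt | ⟨heq, -⟩ <;> omega
            · have hnp : ¬ 1 ≤ mw rest (secOf f) :=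
                fun hx => hex ((mw_pos_iff rest (secOf f)).1 hx)
              have := sev_lb f
              have := mw_nonneg rest (secOf f)
              omega
          have hwf : mw (f :: rest) (secOf f) = sevWeight f := by
            rw [mw_cons_eq f rest (secOf f) rfl]
            omega
          have hmwu : mw (f :: rest) u = mw rest u := mw_cons_ne f rest u huf
          have hk := hf g hg
          simp only [keyA, hgu, Prod.Lex.toLex_le_toLex] at hk
          simp only [skey, hwf, hmwu, Prod.Lex.toLex_lt_toLex]
          rcases hk with hlt | ⟨heq, hle⟩
          · left
            rw [hgw]
            omega
          · right
            refine ⟨by rw [hgw]; omega, lt_of_le_of_ne hle huf⟩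
        · refine List.Pairwise.imp_of_mem ?_ (ih _ hrest)
          intro a b ha hb hab
          have hA := ((mem_sel rest (seen ++ [secOf f]) a).1 ha).2.1
          have hB := ((mem_sel rest (seen ++ [secOf f]) b).1 hb).2.1
          have haf : secOf f ≠ a := fun he =>
            hA (he ▸ List.mem_append.mpr (Or.inr (List.mem_singleton.mpr rfl)))
          have hbf : secOf f ≠ b := fun he =>
            hB (he ▸ List.mem_append.mpr (Or.inr (List.mem_singleton.mpr rfl)))
          simp only [skey] at hab ⊢
          rwa [mw_cons_ne f rest a haf, mw_cons_ne f rest b hbf]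
      · rw [if_neg h2]
        refine List.Pairwise.imp_of_mem ?_ (ih seen hrest)
        intro a b ha hb hab
        have hA := ((mem_sel rest seen a).1 ha).1
        have hB := ((mem_sel rest seen b).1 hb).1
        have haf : secOf f ≠ a := fun he => h2 (by rw [he]; exact hA)
        have hbf : secOf f ≠ b := fun he => h2 (by rw [he]; exact hB)
        simp only [skey] at hab ⊢
        rwa [mw_cons_ne f rest a haf, mw_cons_ne f rest b hbf]


-- CL: membership, nodup, order --------------------------------------------

theorem mem_CL (l : List (List (String × String))) (t : String) :
    t ∈ CL (mw l) ↔ t ∈ alphaList ∧ 1 ≤ mw l t := by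
  have h0 := mw_nonneg l t
  have h3 := mw_le_three l t
  simp only [CL, List.mem_flatMap, List.mem_filter, List.mem_cons, List.not_mem_nil, or_false,
    beq_iff_eq]
  constructor
  · rintro ⟨v, hv, ht, he⟩
    refine ⟨ht, ?_⟩
    rcases hv with rfl | rfl | rfl <;> omega
  · rintro ⟨ht, h1⟩
    exact ⟨mw l t, by omega, ht, rfl⟩


theorem nodup_CL (l : List (List (String × String))) : (CL (mw l)).Nodup := by
  have ha : alphaList.Nodup := by decide
  simp only [CL, List.flatMap_cons, List.flatMap_nil, List.append_nil]
  refine List.Nodup.append (ha.filter _) (List.Nodup.append (ha.filter _) (ha.filter _) ?_) ?_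
  · intro t h2t h1t
    have := (List.mem_filter.mp h2t).2
    have := (List.mem_filter.mp h1t).2
    simp only [beq_iff_eq] at *
    omega
  · intro t h3t ht
    have := (List.mem_filter.mp h3t).2
    rcases List.mem_append.mp ht with h | h <;>
      · have := (List.mem_filter.mp h).2
        simp only [beq_iff_eq] at *
        omega


theorem pairwise_CL (l : List (List (String × String))) :
    (CL (mw l)).Pairwise (fun t u => skey l t < skey l u) := by
  have base : ∀ v : Int, (alphaList.filter (fun t => mw l t == v)).Pairwise
      (fun t u => skey l t < skey l u) := by
    intro v
    refine List.Pairwise.imp_of_mem ?_ (alpha_lt.filter _)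
    intro a b ha hb hab
    have hA := (List.mem_filter.mp ha).2
    have hB := (List.mem_filter.mp hb).2
    rw [beq_iff_eq] at hA hB
    simp only [skey, Prod.Lex.toLex_lt_toLex]
    right
    exact ⟨by omega, hab⟩
  have cross : ∀ v w : Int, w < v → ∀ a ∈ alphaList.filter (fun t => mw l t == v),
      ∀ b ∈ alphaList.filter (fun t => mw l t == w), skey l a < skey l b := by
    intro v w hvw a ha b hb
    have hA := (List.mem_filter.mp ha).2
    have hB := (List.mem_filter.mp hb).2
    rw [beq_iff_eq] at hA hB
    simp only [skey, Prod.Lex.toLex_lt_toLex]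
    left
    omega
  simp only [CL, List.flatMap_cons, List.flatMap_nil, List.append_nil]
  refine List.pairwise_append.mpr ⟨base 3, List.pairwise_append.mpr ⟨base 2, base 1, ?_⟩, ?_⟩
  · intro a ha b hb
    exact cross 2 1 (by omega) a ha b hb
  · intro a ha b hb
    rcases List.mem_append.mp hb with h | h
    · exact cross 3 2 (by omega) a ha b h
    · exact cross 3 1 (by omega) a ha b h


-- B's dict fold computes mw -----------------------------------------------

theorem bw_fold : ∀ (l : List (List (String × String))) (d : PySem.Dict String Int) (t : String),
    d.contains t = true →
    ((l.foldl (fun best f =>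
        if best.contains (fGetD f "section" "") then
          (if best.getD (fGetD f "section" "") 0 < sevWeight f then
            best.insert (fGetD f "section" "") (sevWeight f) else best)
        else best) d).contains t = true ∧
     (l.foldl (fun best f =>
        if best.contains (fGetD f "section" "") then
          (if best.getD (fGetD f "section" "") 0 < sevWeight f then
            best.insert (fGetD f "section" "") (sevWeight f) else best)
        else best) d).getD t 0
      = (l.filter (fun f => secOf f == t)).foldl mwStep (d.getD t 0)) := by
  intro l
  induction l with
  | nil => intro d t h; exact ⟨h, rfl⟩
  | cons f rest ih =>
    intro d t h
    simp only [secOf_def] at ih ⊢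
    simp only [List.foldl_cons, List.filter_cons]
    by_cases hsec : secOf f = t
    · rw [hsec]
      simp only [h, if_pos, beq_self_eq_true, List.foldl_cons]
      by_cases hlt : d.getD t 0 < sevWeight f
      · rw [if_pos hlt]
        have hc' : (d.insert t (sevWeight f)).contains t = true := by
          rw [PySem.Dict.contains_insert]
          simp
        obtain ⟨hca, hga⟩ := ih (d.insert t (sevWeight f)) t hc'
        refine ⟨hca, ?_⟩
        rw [hga, PySem.Dict.getD_insert]
        simp only [if_pos]
        congr 1
        unfold mwStep
        omega
      · rw [if_neg hlt]
        obtain ⟨hca, hga⟩ := ih d t h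
        refine ⟨hca, ?_⟩
        rw [hga]
        congr 1
        unfold mwStep
        omega
    · have hne : (secOf f == t) = false := by
        rw [beq_eq_false_iff_ne]
        exact hsec
      rw [hne]
      simp only [Bool.false_eq_true, if_false]
      by_cases hcs : d.contains (secOf f) = true
      · rw [hcs]
        simp only [if_pos]
        by_cases hlt : d.getD (secOf f) 0 < sevWeight f
        · rw [if_pos hlt]
          have hc' : (d.insert (secOf f) (sevWeight f)).contains t = true := by
            rw [PySem.Dict.contains_insert, h]
            simp
          obtain ⟨hca, hga⟩ := ih (d.insert (secOf f) (sevWeight f)) t hc'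
          refine ⟨hca, ?_⟩
          rw [hga, PySem.Dict.getD_insert]
          rw [if_neg (fun he => hsec he.symm)]
        · rw [if_neg hlt]
          exact ih d t h
      · rw [if_neg hcs]
        exact ih d t h

theorem best_getD (l : List (List (String × String))) (t : String) (ht : t ∈ themesList) :
    (bestWeights l).getD t 0 = mw l t := by
  have hmem : t = "title" ∨ t = "description" ∨ t = "key_features" ∨ t = "images" := by
    simpa [themesList] using ht
  have hc : (PySem.Dict.mk [("title", (0:Int)), ("description", 0), ("key_features", 0),
      ("images", 0)]).contains t = true := by
    rcases hmem with rfl | rfl | rfl | rfl <;> rfl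
  have h0 : (PySem.Dict.mk [("title", (0:Int)), ("description", 0), ("key_features", 0),
      ("images", 0)]).getD t 0 = 0 := by
    rcases hmem with rfl | rfl | rfl | rfl <;> rfl
  have := (bw_fold l (PySem.Dict.mk [("title", (0:Int)), ("description", 0), ("key_features", 0),
      ("images", 0)]) t hc).2
  unfold bestWeights mw
  rw [this, h0]


-- the two selections coincide ---------------------------------------------

theorem sel_eq_CL (findings : List (List (String × String))) :
    sel (PySem.List.sorted findings keyA) [] = CL (mw findings) := by
  have hperm : (PySem.List.sorted findings keyA).Perm findings :=
    PySem.List.sorted_perm findings keyA false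
  have hmem : ∀ t, t ∈ sel (PySem.List.sorted findings keyA) [] ↔ t ∈ CL (mw findings) := by
    intro t
    rw [mem_sel, mem_CL]
    constructor
    · rintro ⟨ht, -, hm⟩
      obtain ⟨g, hg, hgt⟩ := List.mem_map.mp hm
      refine ⟨(themes_alpha t).1 ht, (mw_pos_iff findings t).2 ⟨g, hperm.subset hg, hgt⟩⟩
    · rintro ⟨ha, h1⟩
      obtain ⟨g, hgf, hgt⟩ := (mw_pos_iff findings t).1 h1
      exact ⟨(themes_alpha t).2 ha, List.not_mem_nil,
        List.mem_map.mpr ⟨g, hperm.mem_iff.mpr hgf, hgt⟩⟩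
  have hp : (sel (PySem.List.sorted findings keyA) []).Perm (CL (mw findings)) :=
    (List.perm_ext_iff_of_nodup (nodup_sel _ _) (nodup_CL _)).mpr hmem
  have hpw1 : (sel (PySem.List.sorted findings keyA) []).Pairwise
      (fun t u => skey findings t < skey findings u) := by
    refine (sel_pairwise _ [] (PySem.List.sorted_pairwise findings keyA)).imp ?_
    intro a b hab
    simp only [skey] at hab ⊢
    rwa [mw_perm _ _ a hperm, mw_perm _ _ b hperm] at hab
  have hpw2 := pairwise_CL findings
  have hinj : Function.Injective (skey findings) := by
    intro a b hab
    have := congrArg (fun p : Int ×ₗ String => (ofLex p).2) hab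
    simpa [skey] using this
  exact PySem.List.eq_of_perm_of_pairwise_le_of_injective (skey findings) hinj hp
    (hpw1.imp le_of_lt) (hpw2.imp le_of_lt)


-- tail equalities ----------------------------------------------------------

theorem fallbackFill_length (items fixes : List String) :
    (fallbackFill items fixes).length ≤ max fixes.length 3 := by
  induction items generalizing fixes with
  | nil => simp [fallbackFill]
  | cons i rest ih =>
    simp only [fallbackFill]
    split_ifs with h1 h2
    · exact le_max_left _ _
    · exact ih fixes
    · have := ih (fixes ++ [i])
      simp only [List.length_append, List.length_cons, List.length_nil] at this ⊢
      omega


theorem slice_five (l : List String) (h : l.length ≤ 4) :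
    PySem.List.slice l none (some 5) = l := by
  simp only [PySem.List.slice, PySem.List.clampIdx]
  norm_num
  omega


-- ===== VERDICT (by name: the statement is the Claim_ definition above) =====
theorem generate_top_priority_fixes_spec : Claim_equal_generate_top_priority_fixes := by
  intro findings _
  unfold Spec_generate_top_priority_fixes generate_top_priority_fixes generate_top_priority_fixes_alt
  simp only [findings_by_section]
  rw [titleFix_eq, sorted2_eq_sorted_keyA,
    loopA_eq _ _ [] PySem.Set.empty List.nodup_nil (by intro t ht; cases ht) rfl]
  simp only [show (PySem.Set.empty : PySem.Set String) = [] from rfl]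
  rw [sel_eq_CL]
  rw [← List.map_flatMap]
  have hfil : ∀ v : Int,
      (["description", "images", "key_features", "title"] : List String).filter
        (fun t => (bestWeights findings).getD t 0 == v)
      = alphaList.filter (fun t => mw findings t == v) := by
    intro v
    unfold alphaList
    apply List.filter_congr
    intro t ht
    rw [best_getD findings t ((themes_alpha t).2 ht)]
  have hCL : (([3, 2, 1] : List Int).flatMap (fun v =>
      (["description", "images", "key_features", "title"] : List String).filter
        (fun t => (bestWeights findings).getD t 0 == v))) = CL (mw findings) := by
    simp only [CL, List.flatMap_cons, List.flatMap_nil, hfil]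
  rw [hCL]
  simp only [List.nil_append]
  set tm := themeDict (titleFixB (PySem.Set.ofList
    ((findings.filter (fun f => fGet? f "section" == some "title")).map
      (fun f => fGetD f "issue_type" "")))) with htm
  set fx := (CL (mw findings)).map (fun t => tm.getD t "") with hfx
  have hlenfx : fx.length ≤ 4 := by
    rw [hfx, List.length_map, ← sel_eq_CL findings]
    exact length_sel _ _
  set fx1 := if fx = [] then [fixMaintain] else fx with hfx1
  have hlen1 : fx1.length ≤ 4 := by
    rw [hfx1]
    split_ifs
    · simp
    · exact hlenfx
  apply slice_five
  calc (fallbackFill [tm.getD "title" "", tm.getD "description" "", tm.getD "key_features" "",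
        tm.getD "images" ""] fx1).length
      ≤ max fx1.length 3 := fallbackFill_length _ _
    _ ≤ 4 := by omega
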